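-- pv_equiv track=rewrite | github.com/BlueRainbows/Proj_b | code/functions.py | get_successful_op
-- ===== SOURCE A (Python) =====
-- def get_successful_op(remittance):
--     """Функция обрабатывает документ, выводя список значений операций,
--     если ключ 'from' отсутствует в словаре, то он заменяется на значение '-'.
--     Затем из общего списка операций убирает не удачные, возвращает успешные"""
--     index_list = []
--     list_values = []
--     for i in range(len(remittance)):
--         if 'description' in remittance[i]:
--             if 'from' not in remittance[i]:
--                 remittance[i]['from'] = '-'
--         for v in remittance[i].values():
--             list_values.append(v)
--     for numb in range(len(list_values)):
--         if list_values[numb] == 'CANCELED':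
--             index_list.append(numb)
--     index_list.reverse()
--     for ind in index_list:
--         del list_values[ind:ind+7]
--     return list_values
-- ===== SOURCE B (Python) =====
-- def get_successful_op(remittance):
--     for d in remittance:
--         if 'description' in d:
--             d.setdefault('from', '-')
--     values = [v for d in remittance for v in d.values()]
--     result = []
--     pending = 0
--     for v in values:
--         if v == 'CANCELED':
--             pending += 7
--         if pending:
--             pending -= 1
--         else:
--             result.append(v)
--     return result
-- ===== Notes on version B (the rewrite author's own statement) =====
-- stated objective: alternative
-- what changed: A collects all CANCELED indices in an extra pass, reverses them and repeatedly deletes 7-element slices in place; B makes one forward pass over the flattened values with a skip counter: each CANCELED adds 7 to the counter and elements are dropped while it is positive.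
import Mathlib
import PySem

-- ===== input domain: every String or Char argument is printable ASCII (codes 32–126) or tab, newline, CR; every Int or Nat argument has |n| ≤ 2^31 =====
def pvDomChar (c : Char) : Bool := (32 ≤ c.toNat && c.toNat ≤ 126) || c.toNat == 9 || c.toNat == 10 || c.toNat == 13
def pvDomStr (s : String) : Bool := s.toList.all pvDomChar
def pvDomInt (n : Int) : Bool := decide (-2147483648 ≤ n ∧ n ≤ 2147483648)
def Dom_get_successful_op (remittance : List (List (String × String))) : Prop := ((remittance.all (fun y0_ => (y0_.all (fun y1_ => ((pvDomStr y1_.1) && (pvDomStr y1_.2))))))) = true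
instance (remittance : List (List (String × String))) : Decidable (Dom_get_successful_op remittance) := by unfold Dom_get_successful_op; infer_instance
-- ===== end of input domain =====

-- B replaces A's collect-indices / reverse / repeated 7-wide slice-deletion passes by a single
-- forward pass with a skip counter (objective: alternative algorithm).  A also mutates the input
-- dicts in place (adds 'from': '-'); B's Python performs the same mutation; the theorems below are
-- about the RETURN value.

-- ===== PORT A =====
def get_successful_op (remittance : List (List (String × String))) : List String :=
  -- for i in range(len(remittance)): fix 'from', append values
  let list_values : List String :=
    (List.range remittance.length).foldl (fun acc i =>
      let d := PySem.Dict.ofList (remittance.getD i [])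
      let d := if PySem.Dict.contains d "description" then
                 (if !(PySem.Dict.contains d "from") then PySem.Dict.insert d "from" "-" else d)
               else d
      acc ++ PySem.Dict.values d) []
  -- for numb in range(len(list_values)): collect CANCELED indices
  let index_list : List Nat :=
    (List.range list_values.length).foldl (fun acc numb =>
      if list_values.getD numb "" == "CANCELED" then acc ++ [numb] else acc) []
  -- index_list.reverse(); for ind in index_list: del list_values[ind:ind+7]
  index_list.reverse.foldl (fun lv ind => lv.take ind ++ lv.drop (ind + 7)) list_values

-- ===== PORT B =====
def get_successful_op_alt (remittance : List (List (String × String))) : List String :=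
  -- for d in remittance: if 'description' in d: d.setdefault('from', '-')
  let rem2 := remittance.map (fun d0 =>
    let d := PySem.Dict.ofList d0
    if PySem.Dict.contains d "description" then PySem.Dict.setdefault d "from" "-" else d)
  -- values = [v for d in remittance for v in d.values()]
  let values := rem2.flatMap (fun d => PySem.Dict.values d)
  -- result = []; pending = 0; for v in values: …
  (values.foldl (fun (st : List String × Nat) v =>
    let pending := if v == "CANCELED" then st.2 + 7 else st.2
    if pending > 0 then (st.1, pending - 1) else (st.1 ++ [v], pending)) ([], 0)).1

-- ===== PRECONDITION & SPEC =====
def Spec_get_successful_op (remittance : List (List (String × String))) (out : List String) : Prop := out = get_successful_op_alt remittance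
instance (remittance : List (List (String × String))) (out : List String) : Decidable (Spec_get_successful_op remittance out) := by unfold Spec_get_successful_op; infer_instance

-- ===== CLAIM (what is proved, stated in full; the proofs are below) =====
def Claim_equal_get_successful_op : Prop := ∀ (remittance : List (List (String × String))), Dom_get_successful_op remittance → Spec_get_successful_op remittance (get_successful_op remittance)

-- ===== LEMMAS AND PROOFS =====

-- iterate range(len(xs)) with xs[i] = iterate xs
theorem pvFoldl_range_getD {α β : Type} (g : β → α → β) (dflt : α) :
    ∀ (xs : List α) (init : β),
      (List.range xs.length).foldl (fun acc i => g acc (xs.getD i dflt)) init = xs.foldl g init := by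
  intro xs
  induction xs with
  | nil => intro init; rfl
  | cons x t ih =>
    intro init
    simp only [List.length_cons, List.range_succ_eq_map, List.foldl_cons, List.foldl_map,
      List.getD_cons_zero, List.getD_cons_succ]
    exact ih (g init x)

-- the ascending positions of "CANCELED" in xs, offset by s (proof helper characterising A's index_list)
def pvPos (xs : List String) (s : Nat) : List Nat :=
  match xs with
  | [] => []
  | x :: t => if x == "CANCELED" then s :: pvPos t (s + 1) else pvPos t (s + 1)

theorem pvCollect_eq_pos :
    ∀ (xs : List String) (s : Nat) (acc : List Nat),
      (List.range xs.length).foldl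
        (fun a i => if xs.getD i "" == "CANCELED" then a ++ [i + s] else a) acc
      = acc ++ pvPos xs s := by
  intro xs
  induction xs with
  | nil => intro s acc; simp [pvPos]
  | cons x t ih =>
    intro s acc
    simp only [List.length_cons, List.range_succ_eq_map, List.foldl_cons, List.foldl_map,
      List.getD_cons_zero, List.getD_cons_succ, pvPos]
    have hfun : ∀ (a : List Nat) (i : Nat), i ∈ List.range t.length →
        (if t.getD i "" == "CANCELED" then a ++ [Nat.succ i + s] else a)
        = (if t.getD i "" == "CANCELED" then a ++ [i + (s + 1)] else a) := by
      intro a i _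
      have : Nat.succ i + s = i + (s + 1) := by omega
      rw [this]
    rw [List.foldl_ext _ _ _ hfun, ih (s + 1)]
    by_cases hx : x == "CANCELED" <;> simp [hx]

theorem pvPos_shift : ∀ (xs : List String) (s : Nat), pvPos xs s = (pvPos xs 0).map (· + s) := by
  intro xs
  induction xs with
  | nil => intro s; simp [pvPos]
  | cons x t ih =>
    intro s
    simp only [pvPos]
    rw [ih (s + 1), ih 1]
    by_cases hx : x == "CANCELED" <;>
      simp only [hx, if_true, if_false, List.map_cons, List.map_map, Nat.zero_add,
        Bool.false_eq_true] <;>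
      [skip; skip] <;>
      first
      | (congr 1; apply List.map_congr_left; intro a _; simp; omega)
      | (apply List.map_congr_left; intro a _; simp; omega)

theorem pvPos_eq_nil_of_index?_none (xs : List String)
    (h : PySem.List.index? xs "CANCELED" = none) : ∀ s, pvPos xs s = [] := by
  have hmem : "CANCELED" ∉ xs := (PySem.List.index?_eq_none_iff xs _).mp h
  induction xs with
  | nil => intro s; rfl
  | cons x t ih =>
    intro s
    simp only [List.mem_cons, not_or] at hmem
    simp only [pvPos, beq_iff_eq]
    rw [if_neg (fun hh => hmem.1 hh.symm)]
    exact ih (PySem.List.index?_eq_none_iff t _ |>.mpr hmem.2) hmem.2 (s + 1)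

theorem pvPos_append (pre t : List String) (hpre : "CANCELED" ∉ pre) :
    ∀ s, pvPos (pre ++ t) s = pvPos t (s + pre.length) := by
  induction pre with
  | nil => intro s; simp
  | cons x p ih =>
    intro s
    simp only [List.mem_cons, not_or] at hpre
    simp only [List.cons_append, pvPos, beq_iff_eq]
    rw [if_neg (fun hh => hpre.1 hh.symm)]
    rw [ih hpre.2 (s + 1)]
    congr 1
    simp [List.length_cons]; omega

theorem pvPos_decomp (xs : List String) (j : Nat)
    (h : PySem.List.index? xs "CANCELED" = some j) :
    pvPos xs 0 = j :: (pvPos (xs.drop (j + 1)) 0).map (· + (j + 1)) := by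
  obtain ⟨pre, suf, hxs, hlen, hnot⟩ := (PySem.List.index?_eq_some_iff xs "CANCELED" j).mp h
  subst hxs
  have hdrop : (pre ++ "CANCELED" :: suf).drop (j + 1) = suf := by
    rw [← hlen, List.drop_length_add_append]
    rfl
  rw [hdrop, pvPos_append pre _ hnot 0, Nat.zero_add]
  simp only [pvPos, beq_self_eq_true, if_true]
  rw [pvPos_shift suf (pre.length + 1), hlen]

-- deleting at positions shifted past m only touches the part after m
theorem pvFoldr_del_shift (m : Nat) :
    ∀ (ps : List Nat) (xs : List String), m ≤ xs.length →
      List.foldr (fun ind lv => lv.take ind ++ lv.drop (ind + 7)) xs (ps.map (· + m))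
      = xs.take m ++ List.foldr (fun ind lv => lv.take ind ++ lv.drop (ind + 7)) (xs.drop m) ps := by
  intro ps
  induction ps with
  | nil => intro xs hm; simp
  | cons p t ih =>
    intro xs hm
    simp only [List.map_cons, List.foldr_cons]
    rw [ih xs hm]
    set S := List.foldr (fun ind lv => lv.take ind ++ lv.drop (ind + 7)) (xs.drop m) t
    have hlt : (xs.take m).length = m := by simp [hm]
    have h1 : (xs.take m ++ S).take (p + m) = xs.take m ++ S.take p := by
      have : p + m = (xs.take m).length + p := by omega
      rw [this, List.take_length_add_append]
    have h2 : (xs.take m ++ S).drop (p + m + 7) = S.drop (p + 7) := by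
      have : p + m + 7 = (xs.take m).length + (p + 7) := by omega
      rw [this, List.drop_length_add_append]
    rw [h1, h2, List.append_assoc]

-- proof-only recursion equivalent to A's back-to-front deletions
def pvPrune (xs : List String) : List String :=
  match h : PySem.List.index? xs "CANCELED" with
  | none => xs
  | some j => xs.take j ++ (pvPrune (xs.drop (j + 1))).drop 6
termination_by xs.length
decreasing_by
  obtain ⟨hk, -, -⟩ := PySem.List.getElem_of_index?_eq_some h
  simp only [List.length_drop]; omega

theorem pvPrune_none {xs : List String} (h : PySem.List.index? xs "CANCELED" = none) :
    pvPrune xs = xs := by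
  rw [pvPrune]
  split
  · rfl
  · next j heq => rw [h] at heq; cases heq

theorem pvPrune_some {xs : List String} {j : Nat}
    (h : PySem.List.index? xs "CANCELED" = some j) :
    pvPrune xs = xs.take j ++ (pvPrune (xs.drop (j + 1))).drop 6 := by
  rw [pvPrune]
  split
  · next heq => rw [h] at heq; cases heq
  · next j' heq =>
      rw [h] at heq
      injection heq with hh
      subst hh
      rfl

theorem pvFoldr_del_pos_eq_prune :
    ∀ (xs : List String),
      List.foldr (fun ind lv => lv.take ind ++ lv.drop (ind + 7)) xs (pvPos xs 0) = pvPrune xs := by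
  intro xs
  induction hn : xs.length using Nat.strong_induction_on generalizing xs with
  | _ n ih =>
    match hidx : PySem.List.index? xs "CANCELED" with
    | none =>
      rw [pvPos_eq_nil_of_index?_none xs hidx 0, pvPrune_none hidx]
      rfl
    | some j =>
      obtain ⟨hj, -, -⟩ := PySem.List.getElem_of_index?_eq_some hidx
      rw [pvPos_decomp xs j hidx]
      simp only [List.foldr_cons]
      rw [pvFoldr_del_shift (j + 1) (pvPos (xs.drop (j + 1)) 0) xs (by omega)]
      have hrec : List.foldr (fun ind lv => lv.take ind ++ lv.drop (ind + 7)) (xs.drop (j + 1))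
          (pvPos (xs.drop (j + 1)) 0) = pvPrune (xs.drop (j + 1)) := by
        exact ih (xs.drop (j + 1)).length (by simp; omega) _ rfl
      rw [hrec]
      set R := pvPrune (xs.drop (j + 1))
      have hlt : (xs.take (j + 1)).length = j + 1 := by simp; omega
      have h1 : (xs.take (j + 1) ++ R).take j = xs.take j := by
        rw [List.take_append_of_le_length (by omega), List.take_take]
        congr 1; omega
      have h2 : (xs.take (j + 1) ++ R).drop (j + 7) = R.drop 6 := by
        have : j + 7 = (xs.take (j + 1)).length + 6 := by omega
        rw [this, List.drop_length_add_append]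
      rw [h1, h2, pvPrune_some hidx]

-- proof-only recursion equivalent to B's skip-counter loop
def pvFilter : List String → Nat → List String
  | [], _ => []
  | x :: t, p =>
    let a := if x == "CANCELED" then p + 7 else p
    if a > 0 then pvFilter t (a - 1) else x :: pvFilter t a

theorem pvFilter_succ : ∀ (t : List String) (p : Nat), pvFilter t (p + 1) = (pvFilter t p).drop 1 := by
  intro t
  induction t with
  | nil => intro p; rfl
  | cons x t ih =>
    intro p
    by_cases hx : x == "CANCELED"
    · simp only [pvFilter, hx, if_true]
      have h1 : p + 1 + 7 > 0 := by omega
      have h2 : p + 7 > 0 := by omega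
      rw [if_pos h1, if_pos h2]
      have e1 : p + 1 + 7 - 1 = (p + 7 - 1) + 1 := by omega
      rw [e1, ih]
    · simp only [pvFilter, hx, if_false, Bool.false_eq_true]
      by_cases hp : p > 0
      · rw [if_pos (by omega : p + 1 > 0), if_pos hp]
        have e1 : p + 1 - 1 = (p - 1) + 1 := by omega
        rw [e1, ih]
      · have hp0 : p = 0 := by omega
        subst hp0
        rw [if_pos (by omega : (0:Nat) + 1 > 0), if_neg (by omega)]
        simp

theorem pvFilter_drop : ∀ (p : Nat) (t : List String), pvFilter t p = (pvFilter t 0).drop p := by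
  intro p
  induction p with
  | zero => intro t; simp
  | succ p ih =>
    intro t
    have : p + 1 = (p) + 1 := rfl
    rw [pvFilter_succ t p, ih t, List.drop_drop]

theorem pvFilter_no_marker : ∀ (xs : List String), "CANCELED" ∉ xs → pvFilter xs 0 = xs := by
  intro xs
  induction xs with
  | nil => intro _; rfl
  | cons x t ih =>
    intro h
    simp only [List.mem_cons, not_or] at h
    have hx : (x == "CANCELED") = false := by
      simp only [beq_eq_false_iff_ne, ne_eq]
      exact fun hh => h.1 hh.symm
    simp only [pvFilter, hx, if_false, Bool.false_eq_true]
    rw [if_neg (by omega)]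
    rw [ih h.2]

theorem pvFilter_append_no_marker (pre t : List String) (hpre : "CANCELED" ∉ pre) :
    pvFilter (pre ++ t) 0 = pre ++ pvFilter t 0 := by
  induction pre with
  | nil => simp
  | cons x p ih =>
    simp only [List.mem_cons, not_or] at hpre
    have hx : (x == "CANCELED") = false := by
      simp only [beq_eq_false_iff_ne, ne_eq]
      exact fun hh => hpre.1 hh.symm
    simp only [List.cons_append, pvFilter, hx, if_false, Bool.false_eq_true]
    rw [if_neg (by omega), ih hpre.2]

theorem pvPrune_eq_filter : ∀ (xs : List String), pvPrune xs = pvFilter xs 0 := by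
  intro xs
  induction hn : xs.length using Nat.strong_induction_on generalizing xs with
  | _ n ih =>
    match hidx : PySem.List.index? xs "CANCELED" with
    | none =>
      rw [pvPrune_none hidx, pvFilter_no_marker xs ((PySem.List.index?_eq_none_iff xs _).mp hidx)]
    | some j =>
      obtain ⟨pre, suf, hxs, hlen, hnot⟩ := (PySem.List.index?_eq_some_iff xs "CANCELED" j).mp hidx
      have hrec : pvPrune (xs.drop (j + 1)) = pvFilter (xs.drop (j + 1)) 0 := by
        obtain ⟨hk, -, -⟩ := PySem.List.getElem_of_index?_eq_some hidx
        exact ih (xs.drop (j + 1)).length (by simp; omega) _ rfl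
      rw [pvPrune_some hidx, hrec]
      subst hxs
      have hdrop : (pre ++ "CANCELED" :: suf).drop (j + 1) = suf := by
        rw [← hlen, List.drop_length_add_append]
        rfl
      have htake : (pre ++ "CANCELED" :: suf).take j = pre := by
        rw [← hlen, List.take_left]
      rw [hdrop, htake, pvFilter_append_no_marker pre _ hnot]
      congr 1
      simp only [pvFilter, beq_self_eq_true, if_true]
      rw [if_pos (by omega)]
      have : (7 : Nat) - 1 = 6 := rfl
      rw [this, pvFilter_drop 6 suf]

-- B's foldl computes pvFilter
theorem pvFoldl_eq_filter :
    ∀ (xs : List String) (acc : List String) (p : Nat),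
      (xs.foldl (fun (st : List String × Nat) v =>
        let pending := if v == "CANCELED" then st.2 + 7 else st.2
        if pending > 0 then (st.1, pending - 1) else (st.1 ++ [v], pending)) (acc, p)).1
      = acc ++ pvFilter xs p := by
  intro xs
  induction xs with
  | nil => intro acc p; simp [pvFilter]
  | cons x t ih =>
    intro acc p
    simp only [List.foldl_cons, pvFilter]
    by_cases hx : x == "CANCELED"
    · simp only [hx, if_true]
      rw [if_pos (by omega : p + 7 > 0), if_pos (by omega : p + 7 > 0), ih]
    · simp only [hx, if_false, Bool.false_eq_true]
      by_cases hp : p > 0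
      · rw [if_pos hp, if_pos hp, ih]
      · rw [if_neg hp, if_neg hp, ih, List.append_assoc]
        rfl

-- the two 'from'-fixups agree on each dict
theorem pvFix_eq (d : PySem.Dict String String) :
    (if PySem.Dict.contains d "description" then
       (if !(PySem.Dict.contains d "from") then PySem.Dict.insert d "from" "-" else d)
     else d)
    = (if PySem.Dict.contains d "description" then PySem.Dict.setdefault d "from" "-" else d) := by
  by_cases hdesc : PySem.Dict.contains d "description"
  · simp only [hdesc, if_pos]
    by_cases hfrom : PySem.Dict.contains d "from"
    · rw [PySem.Dict.setdefault_of_contains d "-" hfrom]; simp [hfrom]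
    · rw [PySem.Dict.setdefault_of_not_contains d "-" (by simpa using hfrom)]
      simp [hfrom]
  · simp [hdesc]

-- the flattened value lists agree
theorem pvValues_eq (remittance : List (List (String × String))) :
    (List.range remittance.length).foldl (fun acc i =>
      let d := PySem.Dict.ofList (remittance.getD i [])
      let d := if PySem.Dict.contains d "description" then
                 (if !(PySem.Dict.contains d "from") then PySem.Dict.insert d "from" "-" else d)
               else d
      acc ++ PySem.Dict.values d) []
    = (remittance.map (fun d0 =>
        let d := PySem.Dict.ofList d0
        if PySem.Dict.contains d "description" then PySem.Dict.setdefault d "from" "-" else d)).flatMap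
        (fun d => PySem.Dict.values d) := by
  rw [pvFoldl_range_getD (fun acc d0 =>
      let d := PySem.Dict.ofList d0
      let d := if PySem.Dict.contains d "description" then
                 (if !(PySem.Dict.contains d "from") then PySem.Dict.insert d "from" "-" else d)
               else d
      acc ++ PySem.Dict.values d) ([] : List (String × String)) remittance []]
  rw [List.flatMap_map, PySem.List.foldl_append_eq_flatMap]
  simp only [List.nil_append]
  apply List.flatMap_congr
  intro d0 _
  exact congrArg PySem.Dict.values (pvFix_eq (PySem.Dict.ofList d0))

-- ===== VERDICT (by name: the statement is the Claim_ definition above) =====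
theorem get_successful_op_spec : Claim_equal_get_successful_op := by
  intro remittance _
  unfold Spec_get_successful_op get_successful_op get_successful_op_alt
  simp only []
  rw [pvValues_eq]
  set vals := (remittance.map (fun d0 =>
      let d := PySem.Dict.ofList d0
      if PySem.Dict.contains d "description" then PySem.Dict.setdefault d "from" "-" else d)).flatMap
      (fun d => PySem.Dict.values d) with hvals
  have hcollect : (List.range vals.length).foldl
      (fun acc numb => if vals.getD numb "" == "CANCELED" then acc ++ [numb] else acc) []
      = pvPos vals 0 := by
    have h := pvCollect_eq_pos vals 0 []
    simpa using h
  rw [hcollect, List.foldl_reverse]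
  rw [pvFoldr_del_pos_eq_prune vals, pvPrune_eq_filter vals, pvFoldl_eq_filter vals [] 0]
  simp
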